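-- pv_equiv track=rewrite | github.com/SAG145/Project-Euler | PEP504 - Square on the Inside.py | square_lattice_points
-- ===== SOURCE A (Python) =====
-- import math
--
-- def num_of_latice_points(x,y):
--     points = 0
--     for a in range(1,x):
--         for b in range(1,y):
--             if b*x + a*y < x*y:
--                 points += 1
--     return points
--
-- def square_lattice_points(m):
--     lattice_points = [[0]]
--     for x in range(1,m + 1):
--         points = [0]
--         for y in range(1,m + 1):
--             points.append(num_of_latice_points(x,y))
--         lattice_points.append(points)
--
--     maxi = 10*lattice_points[-1][-1]
--     squares = []
--     for n in range(maxi + 1):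
--         if math.isqrt(n)**2 == n:
--             squares.append(True)
--         else:
--             squares.append(False)
--
--     square_lattice_points = 0
--     for a in range(1,m + 1):
--         for b in range(1, m + 1):
--             points1 = lattice_points[a][b]
--             for c in range(1, m + 1):
--                 points2 = points1 + lattice_points[b][c]
--                 for d in range(1,m + 1):
--                     points_final = points2 + lattice_points[a][d] + lattice_points[c][d] + a + b + c + d - 3
--                     if squares[points_final]:
--                         square_lattice_points += 1
--     return square_lattice_points
-- ===== SOURCE B (Python) =====
-- import math
--
-- def square_lattice_points(m):
--     # Interior lattice points of the right triangle with legs x,y: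
--     # row-by-row closed form, no inner loop over b.
--     def tri(x, y):
--         return sum((k * y - 1) // x for k in range(1, x))
--     L = [[tri(x, y) for y in range(m + 1)] for x in range(m + 1)]
--     total = 0
--     for a in range(1, m + 1):
--         for b in range(1, m + 1):
--             for c in range(1, m + 1):
--                 for d in range(1, m + 1):
--                     s = (L[a][b] + L[b][c] + L[a][d] + L[c][d]
--                          + a + b + c + d - 3)
--                     if math.isqrt(s) ** 2 == s:
--                         total += 1
--     return total
-- ===== Notes on version B (the rewrite author's own statement) =====
-- stated objective: alternative
-- what changed: B fills the lattice-point table with a one-pass per-row floor-division closed form instead of A's O(x*y) double scan per cell, and tests squareness with math.isqrt directly instead of precomputing a boolean sieve; the quadruple cycle count is then taken over that table. Pre_ excludes m in {1,2,3}, on which A raises IndexError (its sieve is shorter than the largest index probed).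
-- outside the precondition, e.g. on square_lattice_points(1): A raises IndexError, B returns 1; on square_lattice_points(2): A raises IndexError, B returns 5; on square_lattice_points(3): A raises IndexError, B returns 13
import Mathlib
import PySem

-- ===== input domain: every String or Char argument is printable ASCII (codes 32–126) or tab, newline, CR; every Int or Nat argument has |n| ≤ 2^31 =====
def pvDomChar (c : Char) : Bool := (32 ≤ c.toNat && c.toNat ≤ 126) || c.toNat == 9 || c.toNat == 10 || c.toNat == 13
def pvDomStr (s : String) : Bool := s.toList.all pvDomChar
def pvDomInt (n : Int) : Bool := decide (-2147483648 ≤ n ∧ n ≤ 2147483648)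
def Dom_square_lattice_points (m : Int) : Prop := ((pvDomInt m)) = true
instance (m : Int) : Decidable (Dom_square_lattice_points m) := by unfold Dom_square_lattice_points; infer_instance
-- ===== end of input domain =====

-- B replaces the O(x*y) double scan per table cell by a one-pass row-count closed form
-- and tests squares with isqrt directly instead of a precomputed boolean sieve (objective: alternative).

-- ===== PORT A =====

-- math.isqrt, ported by hand as a structural fuel recursion (exact for n ≥ 0, the only
-- arguments it receives here; fuel n.toNat dominates the ⌊log₄⌋ recursion depth).
def pyIsqrtFuel : Nat → Nat → Nat
  | 0, _ => 0
  | fuel+1, n =>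
      if n = 0 then 0 else
      let r := 2 * pyIsqrtFuel fuel (n / 4)
      if (r+1)*(r+1) ≤ n then r + 1 else r

def pyIsqrt (n : Int) : Int := (pyIsqrtFuel n.toNat n.toNat : Nat)

def num_of_latice_points (x y : Int) : Int :=
  (PySem.List.pyRange 1 x 1).foldl (fun points a =>
    (PySem.List.pyRange 1 y 1).foldl (fun points b =>
      if b * x + a * y < x * y then points + 1 else points) points) 0

def square_lattice_points (m : Int) : Int :=
  let lattice_points : List (List Int) :=
    (PySem.List.pyRange 1 (m + 1) 1).foldl (fun lp x =>
      lp ++ [(PySem.List.pyRange 1 (m + 1) 1).foldl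
        (fun points y => points ++ [num_of_latice_points x y]) [0]]) [[0]]
  let maxi : Int :=
    10 * PySem.List.pyGetD (PySem.List.pyGetD lattice_points (-1) []) (-1) 0
  let squares : List Bool :=
    (PySem.List.pyRange 0 (maxi + 1) 1).foldl (fun sq n =>
      if pyIsqrt n ^ 2 = n then sq ++ [true] else sq ++ [false]) []
  (PySem.List.pyRange 1 (m + 1) 1).foldl (fun cnt a =>
    (PySem.List.pyRange 1 (m + 1) 1).foldl (fun cnt b =>
      let points1 := PySem.List.pyGetD (PySem.List.pyGetD lattice_points a []) b 0
      (PySem.List.pyRange 1 (m + 1) 1).foldl (fun cnt c =>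
        let points2 := points1 + PySem.List.pyGetD (PySem.List.pyGetD lattice_points b []) c 0
        (PySem.List.pyRange 1 (m + 1) 1).foldl (fun cnt d =>
          let points_final := points2
            + PySem.List.pyGetD (PySem.List.pyGetD lattice_points a []) d 0
            + PySem.List.pyGetD (PySem.List.pyGetD lattice_points c []) d 0
            + a + b + c + d - 3
          if PySem.List.pyGetD squares points_final false = true then cnt + 1 else cnt)
          cnt) cnt) cnt) 0

-- ===== PORT B =====

def pv_tri (x y : Int) : Int :=
  (PySem.List.pyRange 1 x 1).foldl (fun s k => s + PySem.Int.floordiv (k * y - 1) x) 0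

def square_lattice_points_alt (m : Int) : Int :=
  let L : List (List Int) :=
    (PySem.List.pyRange 0 (m + 1) 1).map (fun x =>
      (PySem.List.pyRange 0 (m + 1) 1).map (fun y => pv_tri x y))
  (PySem.List.pyRange 1 (m + 1) 1).foldl (fun total a =>
    (PySem.List.pyRange 1 (m + 1) 1).foldl (fun total b =>
      (PySem.List.pyRange 1 (m + 1) 1).foldl (fun total c =>
        (PySem.List.pyRange 1 (m + 1) 1).foldl (fun total d =>
          let s := PySem.List.pyGetD (PySem.List.pyGetD L a []) b 0
            + PySem.List.pyGetD (PySem.List.pyGetD L b []) c 0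
            + PySem.List.pyGetD (PySem.List.pyGetD L a []) d 0
            + PySem.List.pyGetD (PySem.List.pyGetD L c []) d 0
            + a + b + c + d - 3
          if pyIsqrt s ^ 2 = s then total + 1 else total)
          total) total) total) 0

-- ===== PRECONDITION & SPEC =====
-- Pre_ excludes exactly m ∈ {1, 2, 3}, where A raises IndexError: its squares table only
-- covers 0..10*lattice_points[m][m] and the loop indexes past its end for those m.
def Pre_square_lattice_points (m : Int) : Prop := m ≤ 0 ∨ 4 ≤ m
instance (m : Int) : Decidable (Pre_square_lattice_points m) := by unfold Pre_square_lattice_points; infer_instance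
def pvWitness_square_lattice_points : Int := 4

def Spec_square_lattice_points (m : Int) (out : Int) : Prop := out = square_lattice_points_alt m
instance (m : Int) (out : Int) : Decidable (Spec_square_lattice_points m out) := by unfold Spec_square_lattice_points; infer_instance

-- ===== CLAIM (what is proved, stated in full; the proofs are below) =====
def Claim_equal_square_lattice_points : Prop := ∀ (m : Int), Dom_square_lattice_points m → Pre_square_lattice_points m → Spec_square_lattice_points m (square_lattice_points m)

-- ===== LEMMAS AND PROOFS =====

-- interior points of row a, as a floor: q(a) = ((x-a)*y - 1) // x
def pvQ (x y a : Int) : Int := PySem.Int.floordiv ((x - a) * y - 1) x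

def pvRow (m x : Int) : List Int :=
  [0] ++ (PySem.List.pyRange 1 (m + 1) 1).map (fun y => num_of_latice_points x y)

def pvLP (m : Int) : List (List Int) :=
  [[0]] ++ (PySem.List.pyRange 1 (m + 1) 1).map (pvRow m)

def pvSq (mx : Int) : List Bool :=
  (PySem.List.pyRange 0 (mx + 1) 1).map (fun n => decide (pyIsqrt n ^ 2 = n))

-- the common quadruple loop, written over num_of_latice_points with a direct square test
def pvCount (m : Int) : Int :=
  (PySem.List.pyRange 1 (m + 1) 1).foldl (fun cnt a =>
    (PySem.List.pyRange 1 (m + 1) 1).foldl (fun cnt b =>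
      (PySem.List.pyRange 1 (m + 1) 1).foldl (fun cnt c =>
        (PySem.List.pyRange 1 (m + 1) 1).foldl (fun cnt d =>
          if pyIsqrt (num_of_latice_points a b + num_of_latice_points b c
                + num_of_latice_points a d + num_of_latice_points c d
                + a + b + c + d - 3) ^ 2
              = num_of_latice_points a b + num_of_latice_points b c
                + num_of_latice_points a d + num_of_latice_points c d
                + a + b + c + d - 3
          then cnt + 1 else cnt) cnt) cnt) cnt) 0

lemma pv_countP_range_lt (t n : Nat) (h : t ≤ n) :
    (List.range n).countP (fun k => decide (k < t)) = t := by
  induction n with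
  | zero => simp only [List.range_zero, List.countP_nil]; omega
  | succ n ih =>
    rw [List.range_succ, List.countP_append]
    by_cases ht : t ≤ n
    · simp [ih ht, Nat.not_lt.mpr ht]
    · have h1 : t = n + 1 := by omega
      subst h1
      rw [List.countP_eq_length.mpr (by intro k hk; simp at hk ⊢; omega)]
      simp

lemma pv_countP_pyRange_le (y q : Int) (h0 : 0 ≤ q) (h1 : q ≤ y - 1) :
    ((PySem.List.pyRange 1 y 1).countP (fun b => decide (b ≤ q)) : Int) = q := by
  rw [PySem.List.pyRange_one, List.countP_map]
  rw [List.countP_congr (q := fun k => decide (k < q.toNat))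
    (by intro k hk; simp at hk ⊢; omega)]
  rw [pv_countP_range_lt q.toNat _ (by omega)]
  omega

lemma pv_inner (x y a s : Int) (hy : 1 ≤ y) (ha0 : 0 ≤ a) (hax : a < x) :
    (PySem.List.pyRange 1 y 1).foldl
      (fun points b => if b * x + a * y < x * y then points + 1 else points) s
    = s + pvQ x y a := by
  have hx : 0 < x := by omega
  have hQ0 : 0 ≤ pvQ x y a := by
    rw [pvQ, PySem.Int.le_floordiv_iff_mul_le hx]; nlinarith
  have hQ1 : pvQ x y a ≤ y - 1 := by
    have : pvQ x y a < y := by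
      rw [pvQ, PySem.Int.floordiv_lt_iff_lt_mul hx]; nlinarith
    omega
  have hiff : ∀ b : Int, b * x + a * y < x * y ↔ b ≤ pvQ x y a := by
    intro b
    rw [pvQ, PySem.Int.le_floordiv_iff_mul_le hx]
    constructor <;> intro h <;> nlinarith
  have hfun : (fun (points b : Int) => if b * x + a * y < x * y then points + 1 else points)
      = fun points b => if b ≤ pvQ x y a then points + 1 else points := by
    funext p b
    by_cases h : b * x + a * y < x * y
    · rw [if_pos h, if_pos ((hiff b).mp h)]
    · rw [if_neg h, if_neg (fun hc => h ((hiff b).mpr hc))]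
  rw [hfun, PySem.List.foldl_ite_add_one, pv_countP_pyRange_le y (pvQ x y a) hQ0 hQ1]

lemma pv_num_eq_sum (x y : Int) (hy : 1 ≤ y) :
    num_of_latice_points x y = ((PySem.List.pyRange 1 x 1).map (fun a => pvQ x y a)).sum := by
  unfold num_of_latice_points
  rw [PySem.List.foldl_congr_mem _ _ (fun points a => points + pvQ x y a) _
    (by intro acc a ha
        rw [PySem.List.mem_pyRange_one] at ha
        exact pv_inner x y a acc hy (by omega) ha.2)]
  rw [PySem.List.foldl_add]
  simp

lemma pv_tri_eq_sum (x y : Int) :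
    pv_tri x y
      = ((PySem.List.pyRange 1 x 1).map (fun k => PySem.Int.floordiv (k * y - 1) x)).sum := by
  unfold pv_tri
  rw [PySem.List.foldl_add]
  simp

lemma pv_map_sub (x : Int) :
    (PySem.List.pyRange 1 x 1).map (fun a => x - a) = (PySem.List.pyRange 1 x 1).reverse := by
  have h1 : (PySem.List.pyRange 1 x 1).reverse = PySem.List.pyRange (x - 1) 0 (-1) := by
    rw [PySem.List.pyRange_neg_one_eq_reverse]
    norm_num
  rw [h1, PySem.List.pyRange_neg_one, PySem.List.pyRange_one, List.map_map]
  have h2 : (x - 1 - 0).toNat = (x - 1).toNat := by omega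
  rw [h2]
  apply List.map_congr_left
  intro k _
  simp [Function.comp]
  ring

lemma pv_num_eq_tri (x y : Int) (hy : 1 ≤ y) : num_of_latice_points x y = pv_tri x y := by
  rw [pv_num_eq_sum x y hy, pv_tri_eq_sum]
  have h : (fun a => pvQ x y a)
      = (fun k => PySem.Int.floordiv (k * y - 1) x) ∘ (fun a => x - a) := by
    funext a; simp [pvQ, Function.comp]
  rw [h, ← List.map_map, pv_map_sub, List.map_reverse, List.sum_reverse]

lemma pv_tri_mono_y (x y y' : Int) (_hy : 1 ≤ y) (hyy : y ≤ y') : pv_tri x y ≤ pv_tri x y' := by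
  rw [pv_tri_eq_sum, pv_tri_eq_sum]
  apply List.sum_le_sum
  intro k hk
  rw [PySem.List.mem_pyRange_one] at hk
  have hx : 0 < x := by omega
  have h1 : PySem.Int.floordiv (k * y - 1) x * x ≤ k * y - 1 :=
    (PySem.Int.le_floordiv_iff_mul_le hx).mp le_rfl
  rw [PySem.Int.le_floordiv_iff_mul_le hx]
  nlinarith [hk.1]

lemma pv_shift (x : Int) :
    PySem.List.pyRange 2 (x + 1) 1 = (PySem.List.pyRange 1 x 1).map (fun k => k + 1) := by
  rw [PySem.List.pyRange_one, PySem.List.pyRange_one, List.map_map]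
  have h2 : (x + 1 - 2).toNat = (x - 1).toNat := by omega
  rw [h2]
  apply List.map_congr_left
  intro k _
  simp [Function.comp]
  ring

lemma pv_tri_succ_x (x y : Int) (hx : 1 ≤ x) (hy : 1 ≤ y) : pv_tri x y ≤ pv_tri (x + 1) y := by
  rw [pv_tri_eq_sum, pv_tri_eq_sum]
  rw [PySem.List.pyRange_one_append 1 2 (x + 1) (by omega) (by omega)]
  have h12 : PySem.List.pyRange 1 2 1 = [1] := PySem.List.pyRange_one_singleton 1
  rw [h12, pv_shift, List.map_append, List.sum_append, List.map_map]
  have h0 : 0 ≤ PySem.Int.floordiv (1 * y - 1) (x + 1) := by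
    rw [PySem.Int.le_floordiv_iff_mul_le (by omega)]; nlinarith
  have hterm : ((PySem.List.pyRange 1 x 1).map (fun k => PySem.Int.floordiv (k * y - 1) x)).sum
      ≤ ((PySem.List.pyRange 1 x 1).map
          ((fun k => PySem.Int.floordiv (k * y - 1) (x + 1)) ∘ fun k => k + 1)).sum := by
    apply List.sum_le_sum
    intro k hk
    rw [PySem.List.mem_pyRange_one] at hk
    have hxp : (0:Int) < x := by omega
    have hq1 : PySem.Int.floordiv (k * y - 1) x * x ≤ k * y - 1 :=
      (PySem.Int.le_floordiv_iff_mul_le hxp).mp le_rfl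
    have hq2 : PySem.Int.floordiv (k * y - 1) x < y := by
      rw [PySem.Int.floordiv_lt_iff_lt_mul hxp]; nlinarith [hk.1, hk.2]
    simp only [Function.comp]
    rw [PySem.Int.le_floordiv_iff_mul_le (by omega)]
    nlinarith
  simp only [List.map_cons, List.map_nil, List.sum_cons, List.sum_nil]
  omega

lemma pv_tri_mono_x (x x' y : Int) (hx : 1 ≤ x) (hxx : x ≤ x') (hy : 1 ≤ y) :
    pv_tri x y ≤ pv_tri x' y := by
  induction x', hxx using Int.le_induction with
  | base => exact le_rfl
  | succ n hn ih => exact le_trans ih (pv_tri_succ_x n y (by omega) hy)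

lemma pv_tri_nonneg (x y : Int) (hy : 1 ≤ y) : 0 ≤ pv_tri x y := by
  rw [pv_tri_eq_sum]
  apply List.sum_nonneg
  intro t ht
  obtain ⟨k, hk, rfl⟩ := List.mem_map.mp ht
  rw [PySem.List.mem_pyRange_one] at hk
  rw [PySem.Int.le_floordiv_iff_mul_le (by omega)]
  nlinarith [hk.1]

lemma pv_tri_le (m i j : Int) (h1 : 1 ≤ i) (h2 : i ≤ m) (h3 : 1 ≤ j) (h4 : j ≤ m) :
    pv_tri i j ≤ pv_tri m m :=
  le_trans (pv_tri_mono_y i j m h3 h4) (pv_tri_mono_x i m m h1 h2 (by omega))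

lemma pv_gauss (m : Int) (hm : 1 ≤ m) :
    2 * (((PySem.List.pyRange 1 m 1).map (fun k => k - 1)).sum) = (m - 1) * (m - 2) := by
  induction m, hm using Int.le_induction with
  | base => simp [PySem.List.pyRange_one_eq_nil (le_refl 1)]
  | succ n hn ih =>
    rw [PySem.List.pyRange_one_succ_right (by omega), List.map_append, List.sum_append]
    simp only [List.map_cons, List.map_nil, List.sum_cons, List.sum_nil]
    ring_nf
    ring_nf at ih
    omega

lemma pv_tri_mm (m : Int) (hm : 1 ≤ m) : 2 * pv_tri m m = (m - 1) * (m - 2) := by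
  rw [pv_tri_eq_sum]
  have hmap : (PySem.List.pyRange 1 m 1).map (fun k => PySem.Int.floordiv (k * m - 1) m)
      = (PySem.List.pyRange 1 m 1).map (fun k => k - 1) := by
    apply List.map_congr_left
    intro k hk
    rw [PySem.List.mem_pyRange_one] at hk
    rw [PySem.Int.floordiv_eq_iff_of_pos (by omega)]
    constructor <;> nlinarith [hk.1]
  rw [hmap, pv_gauss m hm]

lemma pv_getD_table {α : Type} (d0 dflt : α) (f : Int → α) (m i : Int)
    (h1 : 1 ≤ i) (h2 : i ≤ m) :
    PySem.List.pyGetD ([d0] ++ (PySem.List.pyRange 1 (m + 1) 1).map f) i dflt = f i := by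
  have hlen : ([d0] ++ (PySem.List.pyRange 1 (m + 1) 1).map f).length = 1 + m.toNat := by
    simp [PySem.List.length_pyRange_one]
    omega
  rw [PySem.List.pyGetD_eq_getElem _ dflt (by omega) (by rw [hlen]; push_cast; omega)]
  rw [List.getElem_append_right (by simp; omega)]
  simp only [List.length_cons, List.length_nil, List.getElem_map]
  rw [PySem.List.getElem_pyRange_one]
  congr 1
  omega

lemma pv_lookupA (m i j : Int) (h1 : 1 ≤ i) (h2 : i ≤ m) (h3 : 1 ≤ j) (h4 : j ≤ m) :
    PySem.List.pyGetD (PySem.List.pyGetD (pvLP m) i []) j 0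
      = num_of_latice_points i j := by
  rw [pvLP]
  rw [pv_getD_table ([0]) ([]) (pvRow m) m i h1 h2]
  rw [pvRow]
  rw [pv_getD_table 0 0 _ m j h3 h4]

lemma pv_tableA (m : Int) :
    (PySem.List.pyRange 1 (m + 1) 1).foldl (fun lp x =>
      lp ++ [(PySem.List.pyRange 1 (m + 1) 1).foldl
        (fun points y => points ++ [num_of_latice_points x y]) [0]]) [[0]] = pvLP m := by
  have h : ∀ x : Int, (PySem.List.pyRange 1 (m + 1) 1).foldl
      (fun points y => points ++ [num_of_latice_points x y]) [0] = pvRow m x := by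
    intro x
    rw [PySem.List.foldl_append_singleton_eq_map]
    rfl
  simp only [h]
  rw [PySem.List.foldl_append_singleton_eq_map]
  rfl

lemma pv_maxi (m : Int) (hm : 1 ≤ m) :
    PySem.List.pyGetD (PySem.List.pyGetD (pvLP m) (-1) []) (-1) 0
      = num_of_latice_points m m := by
  have hsplit : PySem.List.pyRange 1 (m + 1) 1 = PySem.List.pyRange 1 m 1 ++ [m] :=
    PySem.List.pyRange_one_succ_right hm
  rw [pvLP, hsplit, List.map_append]
  rw [show ([m].map (pvRow m)) = [pvRow m m] from rfl, ← List.append_assoc,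
    PySem.List.pyGetD_neg_one_append_singleton]
  rw [pvRow, hsplit, List.map_append]
  rw [show ([m].map (fun y => num_of_latice_points m y)) = [num_of_latice_points m m] from rfl,
    ← List.append_assoc, PySem.List.pyGetD_neg_one_append_singleton]

lemma pv_tableSq (mx : Int) :
    (PySem.List.pyRange 0 (mx + 1) 1).foldl (fun sq n =>
      if pyIsqrt n ^ 2 = n then sq ++ [true] else sq ++ [false]) [] = pvSq mx := by
  have h : (fun (sq : List Bool) (n : Int) =>
        if pyIsqrt n ^ 2 = n then sq ++ [true] else sq ++ [false])
      = fun sq n => sq ++ [decide (pyIsqrt n ^ 2 = n)] := by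
    funext sq n
    by_cases h : pyIsqrt n ^ 2 = n <;> simp [h]
  rw [h, PySem.List.foldl_append_singleton_eq_map]
  rfl

lemma pv_lookupSq (mx i : Int) (h0 : 0 ≤ i) (h1 : i ≤ mx) :
    PySem.List.pyGetD (pvSq mx) i false = decide (pyIsqrt i ^ 2 = i) := by
  rw [pvSq, PySem.List.pyGetD_map_pyRange_of_nonneg _ _ _ _ h0 (by omega)]

lemma pv_lookupB (m i j : Int) (h1 : 1 ≤ i) (h2 : i ≤ m) (h3 : 1 ≤ j) (h4 : j ≤ m) :
    PySem.List.pyGetD (PySem.List.pyGetD ((PySem.List.pyRange 0 (m + 1) 1).map (fun x =>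
      (PySem.List.pyRange 0 (m + 1) 1).map (fun y => pv_tri x y))) i []) j 0 = pv_tri i j := by
  rw [PySem.List.pyGetD_map_pyRange_of_nonneg _ _ _ _ (by omega) (by omega)]
  rw [PySem.List.pyGetD_map_pyRange_of_nonneg _ _ _ _ (by omega) (by omega)]

lemma pv_pf_bounds (m a b c d : Int) (hm : 4 ≤ m)
    (ha1 : 1 ≤ a) (ha2 : a ≤ m) (hb1 : 1 ≤ b) (hb2 : b ≤ m)
    (hc1 : 1 ≤ c) (hc2 : c ≤ m) (hd1 : 1 ≤ d) (hd2 : d ≤ m) :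
    0 ≤ num_of_latice_points a b + num_of_latice_points b c + num_of_latice_points a d
        + num_of_latice_points c d + a + b + c + d - 3
    ∧ num_of_latice_points a b + num_of_latice_points b c + num_of_latice_points a d
        + num_of_latice_points c d + a + b + c + d - 3
      ≤ 10 * num_of_latice_points m m := by
  rw [pv_num_eq_tri a b hb1, pv_num_eq_tri b c hc1, pv_num_eq_tri a d hd1,
    pv_num_eq_tri c d hd1, pv_num_eq_tri m m (by omega)]
  have hT := pv_tri_mm m (by omega)
  have h6T : 4 * m - 3 ≤ 6 * pv_tri m m := by nlinarith
  have e1 := pv_tri_le m a b ha1 ha2 hb1 hb2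
  have e2 := pv_tri_le m b c hb1 hb2 hc1 hc2
  have e3 := pv_tri_le m a d ha1 ha2 hd1 hd2
  have e4 := pv_tri_le m c d hc1 hc2 hd1 hd2
  have n1 := pv_tri_nonneg a b hb1
  have n2 := pv_tri_nonneg b c hc1
  have n3 := pv_tri_nonneg a d hd1
  have n4 := pv_tri_nonneg c d hd1
  constructor <;> linarith

lemma pv_A_eq (m : Int) (hm : 4 ≤ m) : square_lattice_points m = pvCount m := by
  unfold square_lattice_points
  simp only [pv_tableA, pv_maxi m (by omega), pv_tableSq]
  unfold pvCount
  apply PySem.List.foldl_congr_mem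
  intro cnt a ha
  apply PySem.List.foldl_congr_mem
  intro cnt b hb
  apply PySem.List.foldl_congr_mem
  intro cnt c hc
  apply PySem.List.foldl_congr_mem
  intro cnt d hd
  rw [PySem.List.mem_pyRange_one] at ha hb hc hd
  rw [pv_lookupA m a b (by omega) (by omega) (by omega) (by omega),
      pv_lookupA m b c (by omega) (by omega) (by omega) (by omega),
      pv_lookupA m a d (by omega) (by omega) (by omega) (by omega),
      pv_lookupA m c d (by omega) (by omega) (by omega) (by omega)]
  obtain ⟨hpf0, hpf1⟩ := pv_pf_bounds m a b c d hm (by omega) (by omega) (by omega)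
    (by omega) (by omega) (by omega) (by omega) (by omega)
  rw [pv_lookupSq _ _ hpf0 hpf1]
  simp

lemma pv_B_eq (m : Int) : square_lattice_points_alt m = pvCount m := by
  unfold square_lattice_points_alt pvCount
  apply PySem.List.foldl_congr_mem
  intro cnt a ha
  apply PySem.List.foldl_congr_mem
  intro cnt b hb
  apply PySem.List.foldl_congr_mem
  intro cnt c hc
  apply PySem.List.foldl_congr_mem
  intro cnt d hd
  rw [PySem.List.mem_pyRange_one] at ha hb hc hd
  rw [pv_lookupB m a b (by omega) (by omega) (by omega) (by omega),
      pv_lookupB m b c (by omega) (by omega) (by omega) (by omega),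
      pv_lookupB m a d (by omega) (by omega) (by omega) (by omega),
      pv_lookupB m c d (by omega) (by omega) (by omega) (by omega)]
  rw [pv_num_eq_tri a b (by omega), pv_num_eq_tri b c (by omega),
      pv_num_eq_tri a d (by omega), pv_num_eq_tri c d (by omega)]

-- ===== VERDICT (by name: the statement is the Claim_ definition above) =====
theorem square_lattice_points_spec : Claim_equal_square_lattice_points := by
  unfold Claim_equal_square_lattice_points
  intro m _ hpre
  unfold Spec_square_lattice_points
  rcases hpre with hneg | h4
  · have hnil : PySem.List.pyRange 1 (m + 1) 1 = [] :=
      PySem.List.pyRange_one_eq_nil (by omega)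
    unfold square_lattice_points square_lattice_points_alt
    simp [hnil]
  · rw [pv_A_eq m h4, pv_B_eq m]
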